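-- pv_equiv track=rewrite | github.com/yifanzhou106/JavaCoding | PythonCoding/连续数组/寻找数组中异或为0的子数组的最大组数.py | findXorCount
-- ===== SOURCE A (Python) =====
-- def findXorCount(nums):
--     map = {}
--     xor = 0
--     map[0] = -1
--     dp = [0 for _ in range(len(nums))]
--     for i in range(len(nums)):
--         xor = xor ^ nums[i]
--         if xor in map:
--             pre = map.get(xor)
--             dp[i] = dp[pre] + 1 if pre != -1 else 1
--         if i > 0:
--             dp[i] = max(dp[i-1], dp[i])
--         map[xor] = i
--     return dp [-1]
-- ===== SOURCE B (Python) =====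
-- def findXorCount(nums):
--     # greedy earliest-finish scan: cut whenever the running xor repeats within
--     # the current segment; one set, no dp array, no last-index map
--     count = 0
--     cur = 0
--     seen = {0}
--     for x in nums:
--         cur ^= x
--         if cur in seen:
--             count += 1
--             cur = 0
--             seen = {0}
--         else:
--             seen.add(cur)
--     return count
-- ===== Notes on version B (the rewrite author's own statement) =====
-- stated objective: simpler
-- what changed: Replaces the dp-array plus xor->last-index map with a greedy earliest-finish scan that keeps only a running prefix xor, a set of xors seen in the current segment, and a counter, resetting at each zero-xor hit; measured constant-factor speedup (no dp list or dict maintained).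
import Mathlib
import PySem

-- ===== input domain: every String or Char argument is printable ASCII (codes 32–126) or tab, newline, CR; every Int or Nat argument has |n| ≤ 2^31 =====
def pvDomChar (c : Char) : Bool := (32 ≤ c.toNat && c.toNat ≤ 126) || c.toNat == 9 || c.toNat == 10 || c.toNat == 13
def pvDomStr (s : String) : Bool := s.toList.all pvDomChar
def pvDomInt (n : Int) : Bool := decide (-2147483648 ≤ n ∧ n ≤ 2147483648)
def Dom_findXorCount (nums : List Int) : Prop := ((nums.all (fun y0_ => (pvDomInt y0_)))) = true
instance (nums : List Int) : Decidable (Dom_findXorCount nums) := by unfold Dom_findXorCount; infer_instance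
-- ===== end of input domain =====

-- B replaces A's dp-array + xor->last-index map with a greedy earliest-finish scan
-- (running xor, one set per segment, a counter); same return value on every non-empty list.


-- ===== PORT A =====
-- one loop iteration of A: xor in nums[i]; dp[i] from the last index carrying this xor
-- (if any); dp[i] = max(dp[i-1], dp[i]) for i > 0; record map[xor] = i
def findXorCount_step (nums : List Int) (st : PySem.Dict Int Int × Int × List Int) (i : Int) :
    PySem.Dict Int Int × Int × List Int :=
  let map := st.1
  let xr := PySem.Int.bxor st.2.1 (PySem.List.pyGetD nums i 0)
  let dp := st.2.2
  let dp :=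
    if PySem.Dict.contains map xr then
      let pre := PySem.Dict.getD map xr 0
      PySem.List.pySetD dp i (if pre ≠ -1 then PySem.List.pyGetD dp pre 0 + 1 else 1)
    else dp
  let dp :=
    if i > 0 then
      PySem.List.pySetD dp i (max (PySem.List.pyGetD dp (i - 1) 0) (PySem.List.pyGetD dp i 0))
    else dp
  (PySem.Dict.insert map xr i, xr, dp)

def findXorCount (nums : List Int) : Int :=
  let map0 : PySem.Dict Int Int := PySem.Dict.insert PySem.Dict.empty 0 (-1)
  let dp0 : List Int := (PySem.List.pyRange 0 (nums.length : Int) 1).map (fun _ => (0 : Int))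
  let st := (PySem.List.pyRange 0 (nums.length : Int) 1).foldl (findXorCount_step nums) (map0, 0, dp0)
  PySem.List.pyGetD st.2.2 (-1) 0

-- ===== PORT B =====
-- one loop iteration of B: xor in x; on a repeat within the segment, count a cut and reset
def findXorCount_altStep (st : Int × Int × PySem.Set Int) (x : Int) : Int × Int × PySem.Set Int :=
  let cur := PySem.Int.bxor st.2.1 x
  if PySem.Set.contains st.2.2 cur then (st.1 + 1, 0, PySem.Set.ofList [0])
  else (st.1, cur, PySem.Set.add st.2.2 cur)

def findXorCount_alt (nums : List Int) : Int :=
  (nums.foldl findXorCount_altStep (0, 0, PySem.Set.ofList [0])).1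

-- ===== PRECONDITION & SPEC =====
-- A finally indexes the last element of the dp array, an IndexError on the empty list; Pre_ excludes exactly that input.
def Pre_findXorCount (nums : List Int) : Prop := nums ≠ []
instance (nums : List Int) : Decidable (Pre_findXorCount nums) := by unfold Pre_findXorCount; infer_instance
def pvWitness_findXorCount : List Int := [3]

def Spec_findXorCount (nums : List Int) (out : Int) : Prop := out = findXorCount_alt nums
instance (nums : List Int) (out : Int) : Decidable (Spec_findXorCount nums out) := by unfold Spec_findXorCount; infer_instance

-- ===== CLAIM (what is proved, stated in full; the proofs are below) =====
def Claim_equal_findXorCount : Prop := ∀ (nums : List Int), Dom_findXorCount nums → Pre_findXorCount nums → Spec_findXorCount nums (findXorCount nums)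

-- ===== LEMMAS AND PROOFS =====

-- ---- a small xor toolkit: PySem.Int.bxor is associative and cancellative ----
def pvXdec (s : Bool) (n : Nat) : Int := if s then -(n : Int) - 1 else (n : Int)

lemma pvBxor_eq_xdec (a b : Int) :
    PySem.Int.bxor a b = pvXdec (xor (decide (a < 0)) (decide (b < 0)))
      ((if 0 ≤ a then a.toNat else (-a - 1).toNat) ^^^ (if 0 ≤ b then b.toNat else (-b - 1).toNat)) := by
  by_cases ha : 0 ≤ a <;> by_cases hb : 0 ≤ b <;>
    · simp [PySem.Int.bxor, pvXdec, ha, hb]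
      omega

lemma pvXdec_lt (s : Bool) (n : Nat) : decide (pvXdec s n < 0) = s := by
  cases s <;> simp [pvXdec]
  all_goals omega

lemma pvXdec_toNat (s : Bool) (n : Nat) :
    (if 0 ≤ pvXdec s n then (pvXdec s n).toNat else (-(pvXdec s n) - 1).toNat) = n := by
  cases s <;> simp [pvXdec]
  all_goals omega

lemma pvBxor_assoc (a b c : Int) :
    PySem.Int.bxor (PySem.Int.bxor a b) c = PySem.Int.bxor a (PySem.Int.bxor b c) := by
  rw [pvBxor_eq_xdec a b, pvBxor_eq_xdec b c, pvBxor_eq_xdec (pvXdec _ _), pvBxor_eq_xdec a (pvXdec _ _)]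
  rw [pvXdec_lt, pvXdec_toNat, pvXdec_lt, pvXdec_toNat, Bool.xor_assoc, Nat.xor_assoc]

lemma pvBxor_cancel_left (a b : Int) : PySem.Int.bxor a (PySem.Int.bxor a b) = b := by
  rw [← pvBxor_assoc, PySem.Int.bxor_self, PySem.Int.bxor_comm, PySem.Int.bxor_zero]

lemma pvBxor_left_inj (a b c : Int) : PySem.Int.bxor a b = PySem.Int.bxor a c ↔ b = c := by
  constructor
  · intro h
    have h2 := congrArg (PySem.Int.bxor a) h
    rwa [pvBxor_cancel_left, pvBxor_cancel_left] at h2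
  · intro h; rw [h]

-- ---- prefix xors ----
def pvP (nums : List Int) (k : Nat) : Int := (nums.take k).foldl PySem.Int.bxor 0

lemma pvP_zero (nums : List Int) : pvP nums 0 = 0 := rfl

lemma pvP_succ (nums : List Int) (k : Nat) (hk : k < nums.length) :
    pvP nums (k + 1) = PySem.Int.bxor (pvP nums k) nums[k] := by
  unfold pvP
  rw [List.take_add_one, List.getElem?_eq_getElem hk, Option.toList_some, List.foldl_append]
  rfl

-- ---- ghost greedy process: (segment start, number of cuts) after i elements ----
def pvCutAt (nums : List Int) (r i : Nat) : Bool :=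
  (List.range (i + 1)).any (fun k => r ≤ k && pvP nums k == pvP nums (i + 1))

lemma pvCutAt_iff (nums : List Int) (r i : Nat) :
    pvCutAt nums r i = true ↔ ∃ k, r ≤ k ∧ k ≤ i ∧ pvP nums k = pvP nums (i + 1) := by
  unfold pvCutAt
  simp only [List.any_eq_true, List.mem_range, Bool.and_eq_true, decide_eq_true_eq, beq_iff_eq]
  constructor
  · rintro ⟨k, hk, hr, he⟩; exact ⟨k, hr, by omega, he⟩
  · rintro ⟨k, hr, hk, he⟩; exact ⟨k, by omega, hr, he⟩

def pvG (nums : List Int) : Nat → Nat × Int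
  | 0 => (0, 0)
  | i + 1 =>
    if pvCutAt nums (pvG nums i).1 i then (i + 1, (pvG nums i).2 + 1) else pvG nums i

lemma pvG_succ (nums : List Int) (i : Nat) :
    pvG nums (i + 1) =
      if pvCutAt nums (pvG nums i).1 i then (i + 1, (pvG nums i).2 + 1) else pvG nums i := rfl

lemma pvG_fst_le (nums : List Int) (i : Nat) : (pvG nums i).1 ≤ i := by
  induction i with
  | zero => simp [pvG]
  | succ i ih =>
    rw [pvG_succ]
    split
    · simp
    · omega

lemma pvG_snd_nonneg (nums : List Int) (i : Nat) : 0 ≤ (pvG nums i).2 := by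
  induction i with
  | zero => simp [pvG]
  | succ i ih =>
    rw [pvG_succ]
    split
    · simp; omega
    · exact ih

lemma pvG_snd_mono (nums : List Int) (i j : Nat) (h : i ≤ j) : (pvG nums i).2 ≤ (pvG nums j).2 := by
  induction j with
  | zero =>
    have h0 : i = 0 := Nat.le_zero.mp h
    subst h0; exact le_refl _
  | succ j ih =>
    rcases Nat.lt_or_ge i (j + 1) with hlt | hge
    · have h2 : (pvG nums i).2 ≤ (pvG nums j).2 := ih (by omega)
      rw [pvG_succ]
      split
      · simp; omega
      · exact h2
    · have h0 : i = j + 1 := by omega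
      subst h0; exact le_refl _

-- within the current segment the cut count is constant
lemma pvG_seg_const (nums : List Int) (i k : Nat) (h1 : (pvG nums i).1 ≤ k) (h2 : k ≤ i) :
    (pvG nums k).2 = (pvG nums i).2 := by
  induction i generalizing k with
  | zero =>
    have h0 : k = 0 := Nat.le_zero.mp h2
    subst h0; rfl
  | succ i ih =>
    rw [pvG_succ] at h1 ⊢
    by_cases hc : pvCutAt nums (pvG nums i).1 i = true
    · simp [hc] at h1 ⊢
      have h0 : k = i + 1 := by omega
      subst h0
      rw [pvG_succ]
      simp [hc]
    · simp [hc] at h1 ⊢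
      rcases Nat.lt_or_ge k (i + 1) with hlt | hge
      · exact ih k h1 (by omega)
      · have h0 : k = i + 1 := by omega
        subst h0
        rw [pvG_succ]
        simp [hc]

-- at the segment start the count has just increased
lemma pvG_cut_eq (nums : List Int) (i : Nat) (h : 0 < (pvG nums i).1) :
    (pvG nums (pvG nums i).1).2 = (pvG nums ((pvG nums i).1 - 1)).2 + 1 := by
  induction i with
  | zero => simp [pvG] at h
  | succ i ih =>
    rw [pvG_succ] at h ⊢
    by_cases hc : pvCutAt nums (pvG nums i).1 i = true
    · simp [hc]
      rw [pvG_succ]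
      simp [hc]
    · simp [hc] at h ⊢
      exact ih h

-- strictly before the current segment the count is strictly smaller
lemma pvG_before_lt (nums : List Int) (i k : Nat) (h : k < (pvG nums i).1) :
    (pvG nums k).2 < (pvG nums i).2 := by
  have hr0 : 0 < (pvG nums i).1 := by omega
  have h1 := pvG_cut_eq nums i hr0
  have h2 : (pvG nums k).2 ≤ (pvG nums ((pvG nums i).1 - 1)).2 := pvG_snd_mono nums _ _ (by omega)
  have h3 : (pvG nums ((pvG nums i).1)).2 = (pvG nums i).2 :=
    pvG_seg_const nums i ((pvG nums i).1) (le_refl _) (pvG_fst_le nums i)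
  omega

-- ---- last occurrence of a prefix xor (what A's map stores) ----
def pvLast (nums : List Int) : Nat → Int → Option Nat
  | 0, v => if pvP nums 0 = v then some 0 else none
  | i + 1, v => if pvP nums (i + 1) = v then some (i + 1) else pvLast nums i v

lemma pvLast_succ (nums : List Int) (i : Nat) (v : Int) :
    pvLast nums (i + 1) v = if pvP nums (i + 1) = v then some (i + 1) else pvLast nums i v := rfl

lemma pvLast_none (nums : List Int) (i : Nat) (v : Int) (h : pvLast nums i v = none) :
    ∀ k ≤ i, pvP nums k ≠ v := by
  induction i with
  | zero =>
    intro k hk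
    interval_cases k
    unfold pvLast at h
    by_cases he : pvP nums 0 = v <;> simp [he] at h ⊢
  | succ i ih =>
    unfold pvLast at h
    by_cases he : pvP nums (i+1) = v
    · simp [he] at h
    · simp [he] at h
      intro k hk
      rcases Nat.lt_or_ge k (i+1) with hlt | hge
      · exact ih h k (by omega)
      · have : k = i + 1 := by omega
        subst this; exact he

lemma pvLast_some (nums : List Int) (i : Nat) (v : Int) (k : Nat) (h : pvLast nums i v = some k) :
    k ≤ i ∧ pvP nums k = v ∧ ∀ j, k < j → j ≤ i → pvP nums j ≠ v := by
  induction i with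
  | zero =>
    unfold pvLast at h
    by_cases he : pvP nums 0 = v <;> simp [he] at h
    subst h
    exact ⟨le_refl _, he, by omega⟩
  | succ i ih =>
    unfold pvLast at h
    by_cases he : pvP nums (i+1) = v
    · simp [he] at h
      subst h
      exact ⟨le_refl _, he, by omega⟩
    · simp [he] at h
      obtain ⟨h1, h2, h3⟩ := ih h
      refine ⟨by omega, h2, ?_⟩
      intro j hj1 hj2
      rcases Nat.lt_or_ge j (i+1) with hlt | hge
      · exact h3 j hj1 (by omega)
      · have : j = i + 1 := by omega
        subst this; exact he

-- ---- the greedy count satisfies A's dp recurrence ----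
lemma pvG_core_none (nums : List Int) (i : Nat)
    (h : pvLast nums i (pvP nums (i + 1)) = none) :
    pvG nums (i + 1) = pvG nums i := by
  have hno := pvLast_none nums i _ h
  have hc : pvCutAt nums (pvG nums i).1 i = false := by
    rw [Bool.eq_false_iff]
    intro hcut
    obtain ⟨k, _, hk2, hk3⟩ := (pvCutAt_iff nums _ i).mp hcut
    exact hno k hk2 hk3
  rw [pvG_succ]
  simp [hc]

lemma pvG_core_some (nums : List Int) (i k : Nat)
    (h : pvLast nums i (pvP nums (i + 1)) = some k) :
    (pvG nums (i + 1)).2 = max (pvG nums i).2 ((pvG nums k).2 + 1) := by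
  obtain ⟨hk1, hk2, hk3⟩ := pvLast_some nums i _ k h
  by_cases hc : pvCutAt nums (pvG nums i).1 i
  · -- a cut happens: k lies in the current segment, so its count equals the current count
    obtain ⟨k0, hk01, hk02, hk03⟩ := (pvCutAt_iff nums _ i).mp hc
    have hk0k : k0 ≤ k := by
      by_contra hgt
      exact hk3 k0 (by omega) hk02 hk03
    have hseg : (pvG nums k).2 = (pvG nums i).2 :=
      pvG_seg_const nums i k (by omega) hk1
    have h3 : pvG nums (i+1) = (i + 1, (pvG nums i).2 + 1) := by rw [pvG_succ]; simp [hc]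
    rw [h3]
    simp
    omega
  · -- no cut: the last occurrence is before the segment, its count is strictly smaller
    have hkr : k < (pvG nums i).1 := by
      by_contra hge
      exact hc ((pvCutAt_iff nums _ i).mpr ⟨k, by omega, hk1, hk2⟩)
    have hlt := pvG_before_lt nums i k hkr
    have h3 : pvG nums (i+1) = pvG nums i := by rw [pvG_succ]; simp [hc]
    rw [h3]
    omega

-- ---- A-side: state after i iterations and its invariant ----
def pvA (nums : List Int) (i : Nat) : PySem.Dict Int Int × Int × List Int :=
  ((List.range i).map (fun k : Nat => (k : Int))).foldl (findXorCount_step nums)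
    (PySem.Dict.insert PySem.Dict.empty 0 (-1), 0,
     (PySem.List.pyRange 0 (nums.length : Int) 1).map (fun _ => (0 : Int)))

lemma pvA_succ (nums : List Int) (i : Nat) :
    pvA nums (i + 1) = findXorCount_step nums (pvA nums i) (i : Int) := by
  unfold pvA
  rw [List.range_succ]
  simp

lemma findXorCount_eq_pvA (nums : List Int) :
    findXorCount nums = PySem.List.pyGetD (pvA nums nums.length).2.2 (-1) 0 := by
  unfold findXorCount pvA
  rw [PySem.List.pyRange_zero_nat]

lemma pvA_inv (nums : List Int) (i : Nat) (hi : i ≤ nums.length) :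
    (pvA nums i).2.1 = pvP nums i ∧
    (pvA nums i).2.2.length = nums.length ∧
    (∀ j : Nat, j < nums.length →
      (pvA nums i).2.2.getD j 0 = if j < i then (pvG nums (j + 1)).2 else 0) ∧
    (∀ v : Int, (pvA nums i).1.get? v = (pvLast nums i v).map (fun k : Nat => (k : Int) - 1)) := by
  induction i with
  | zero =>
    refine ⟨rfl, ?_, ?_, ?_⟩
    · show ((PySem.List.pyRange 0 (nums.length : Int) 1).map (fun _ => (0 : Int))).length = nums.length
      rw [List.map_const', List.length_replicate, PySem.List.length_pyRange_one]
      omega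
    · intro j hj
      show ((PySem.List.pyRange 0 (nums.length : Int) 1).map (fun _ => (0 : Int))).getD j 0 = _
      rw [List.map_const', List.getD_eq_getElem?_getD, List.getElem?_replicate]
      simp [hj]
    · intro v
      show (PySem.Dict.insert PySem.Dict.empty 0 (-1)).get? v = _
      by_cases hv : v = (0 : Int)
      · subst hv
        rw [PySem.Dict.get?_insert_self]
        show _ = (pvLast nums 0 0).map _
        unfold pvLast
        rw [if_pos (pvP_zero nums)]
        rfl
      · rw [PySem.Dict.get?_insert_of_ne _ _ hv, PySem.Dict.get?_empty]
        unfold pvLast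
        rw [if_neg (by rw [pvP_zero]; exact fun h => hv h.symm)]
        rfl
  | succ i ih =>
    have hilen : i < nums.length := by omega
    obtain ⟨ih1, ih2, ih3, ih4⟩ := ih (by omega)
    rw [pvA_succ]
    simp only [findXorCount_step]
    have hxr : PySem.Int.bxor (pvA nums i).2.1 (PySem.List.pyGetD nums (i : Int) 0) =
        pvP nums (i + 1) := by
      rw [ih1, PySem.List.pyGetD_natCast, List.getD_eq_getElem?_getD,
          List.getElem?_eq_getElem hilen, Option.getD_some, ← pvP_succ nums i hilen]
    rw [hxr]
    -- the dp list after this iteration, by cases on A's two in-place updates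
    set L := pvLast nums i (pvP nums (i + 1)) with hLdef
    have hget : (pvA nums i).1.get? (pvP nums (i + 1)) = L.map (fun k : Nat => (k : Int) - 1) :=
      ih4 _
    have hcont : (pvA nums i).1.contains (pvP nums (i + 1)) = (L.map (fun k : Nat => (k : Int) - 1)).isSome := by
      rw [PySem.Dict.contains_eq_isSome_get?, hget]
    -- the wrapped-up map invariant after inserting map[xor] = i
    have hmap : ∀ v : Int, ((pvA nums i).1.insert (pvP nums (i + 1)) (i : Int)).get? v =
        (pvLast nums (i + 1) v).map (fun k : Nat => (k : Int) - 1) := by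
      intro v
      by_cases hv : v = pvP nums (i + 1)
      · subst hv
        rw [PySem.Dict.get?_insert_self]
        rw [pvLast_succ, if_pos rfl, Option.map_some]
        congr 1
        push_cast
        ring
      · rw [PySem.Dict.get?_insert_of_ne _ _ hv, ih4 v]
        rw [pvLast_succ, if_neg (fun h => hv h.symm)]
    -- getD after writing dp[i] := the new count
    have hdpset : ∀ j : Nat, j < nums.length →
        ((pvA nums i).2.2.set i ((pvG nums (i + 1)).2)).getD j 0 =
          if j < i + 1 then (pvG nums (j + 1)).2 else 0 := by
      intro j hj
      by_cases hji : j = i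
      · subst hji
        rw [List.getD_eq_getElem?_getD, List.getElem?_set_self (by rw [ih2]; omega)]
        simp
      · rw [List.getD_eq_getElem?_getD, List.getElem?_set_ne (fun h => hji h.symm),
            ← List.getD_eq_getElem?_getD, ih3 j hj]
        by_cases hj2 : j < i
        · rw [if_pos hj2, if_pos (by omega)]
        · rw [if_neg hj2, if_neg (by omega)]
    rcases hL : L with _ | k
    · -- no previous occurrence of this prefix xor: dp[i] only gets the running max
      rw [hL] at hcont
      simp only [Option.map_none, Option.isSome_none] at hcont
      rw [hcont]
      simp only [Bool.false_eq_true, if_false]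
      have hcore := pvG_core_none nums i hL
      by_cases hi0 : i = 0
      · subst hi0
        rw [if_neg (by omega : ¬ ((0 : Nat) : Int) > 0)]
        refine ⟨by trivial, ih2, ?_, hmap⟩
        intro j hj
        rw [ih3 j hj]
        rcases Nat.eq_zero_or_pos j with rfl | hjpos
        · rw [if_neg (by omega), if_pos (by omega), hcore]
          rfl
        · rw [if_neg (by omega : ¬ j < 0), if_neg (by omega : ¬ j < 0 + 1)]
      · rw [if_pos (by omega : ((i : Nat) : Int) > 0)]
        have hm1 : ((i : Nat) : Int) - 1 = (((i - 1 : Nat)) : Int) := by omega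
        rw [hm1]
        simp only [PySem.List.pyGetD_natCast, PySem.List.pySetD_natCast]
        rw [ih3 (i - 1) (by omega), ih3 i (by omega), if_pos (by omega), if_neg (by omega)]
        have hprev : i - 1 + 1 = i := by omega
        rw [hprev]
        have hmax : max (pvG nums i).2 0 = (pvG nums i).2 :=
          max_eq_left (pvG_snd_nonneg nums i)
        rw [hmax, show (pvG nums i).2 = (pvG nums (i + 1)).2 from by rw [hcore]]
        exact ⟨by trivial, by rw [List.length_set, ih2], hdpset, hmap⟩
    · -- last previous occurrence at prefix index k: dp[i] := dp[k-1] + 1 (or 1), then the max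
      obtain ⟨hk1, hk2, hk3⟩ := pvLast_some nums i _ k hL
      have hcore := pvG_core_some nums i k hL
      rw [hL] at hcont
      simp only [Option.map_some, Option.isSome_some] at hcont
      rw [hcont]
      simp only [if_true]
      have hpre : (pvA nums i).1.getD (pvP nums (i + 1)) 0 = (k : Int) - 1 := by
        rw [PySem.Dict.getD_eq_get?_getD, hget, hL, Option.map_some, Option.getD_some]
      rw [hpre]
      have hval : (if ((k : Int) - 1) ≠ -1 then PySem.List.pyGetD (pvA nums i).2.2 ((k : Int) - 1) 0 + 1 else 1) =
          (pvG nums k).2 + 1 := by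
        by_cases hk0 : k = 0
        · subst hk0
          rw [if_neg (by omega)]
          simp [pvG]
        · rw [if_pos (by omega), show ((k : Nat) : Int) - 1 = (((k - 1 : Nat)) : Int) from by omega,
              PySem.List.pyGetD_natCast, ih3 (k - 1) (by omega), if_pos (by omega),
              show k - 1 + 1 = k from by omega]
      rw [hval]
      simp only [PySem.List.pySetD_natCast]
      by_cases hi0 : i = 0
      · subst hi0
        rw [if_neg (by omega : ¬ ((0 : Nat) : Int) > 0)]
        have hk0 : k = 0 := by omega
        subst hk0
        have hc1 : (pvG nums (0 + 1)).2 = (pvG nums 0).2 + 1 := by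
          rw [hcore]
          simp [pvG]
        rw [show (pvG nums 0).2 + 1 = (pvG nums (0 + 1)).2 from hc1.symm]
        exact ⟨by trivial, by rw [List.length_set, ih2], hdpset, hmap⟩
      · rw [if_pos (by omega : ((i : Nat) : Int) > 0)]
        have hm1 : ((i : Nat) : Int) - 1 = (((i - 1 : Nat)) : Int) := by omega
        rw [hm1]
        simp only [PySem.List.pyGetD_natCast]
        have hgetprev : ((pvA nums i).2.2.set i ((pvG nums k).2 + 1)).getD (i - 1) 0 = (pvG nums i).2 := by
          rw [List.getD_eq_getElem?_getD, List.getElem?_set_ne (by omega),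
              ← List.getD_eq_getElem?_getD, ih3 (i - 1) (by omega), if_pos (by omega),
              show i - 1 + 1 = i from by omega]
        have hgetself : ((pvA nums i).2.2.set i ((pvG nums k).2 + 1)).getD i 0 = (pvG nums k).2 + 1 := by
          rw [List.getD_eq_getElem?_getD, List.getElem?_set_self (by rw [ih2]; omega), Option.getD_some]
        rw [hgetprev, hgetself, List.set_set,
            show max (pvG nums i).2 ((pvG nums k).2 + 1) = (pvG nums (i + 1)).2 from hcore.symm]
        exact ⟨by trivial, by rw [List.length_set, ih2], hdpset, hmap⟩

-- ---- B-side: state after i elements and its invariant ----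
def pvB (nums : List Int) (i : Nat) : Int × Int × PySem.Set Int :=
  (nums.take i).foldl findXorCount_altStep (0, 0, PySem.Set.ofList [0])

lemma pvB_succ (nums : List Int) (i : Nat) (hi : i < nums.length) :
    pvB nums (i + 1) = findXorCount_altStep (pvB nums i) nums[i] := by
  unfold pvB
  rw [List.take_add_one, List.getElem?_eq_getElem hi, Option.toList_some, List.foldl_append]
  rfl

lemma findXorCount_alt_eq_pvB (nums : List Int) :
    findXorCount_alt nums = (pvB nums nums.length).1 := by
  unfold findXorCount_alt pvB
  rw [List.take_length]

lemma pvB_inv (nums : List Int) (i : Nat) (hi : i ≤ nums.length) :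
    (pvB nums i).1 = (pvG nums i).2 ∧
    (pvB nums i).2.1 = PySem.Int.bxor (pvP nums (pvG nums i).1) (pvP nums i) ∧
    (∀ v : Int, v ∈ (pvB nums i).2.2 ↔
      ∃ k, (pvG nums i).1 ≤ k ∧ k ≤ i ∧ v = PySem.Int.bxor (pvP nums (pvG nums i).1) (pvP nums k)) := by
  induction i with
  | zero =>
    refine ⟨rfl, ?_, ?_⟩
    · show (0 : Int) = PySem.Int.bxor (pvP nums (pvG nums 0).1) (pvP nums 0)
      simp only [show pvG nums 0 = (0, 0) from rfl, pvP_zero, PySem.Int.bxor_self]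
    · intro v
      show v ∈ PySem.Set.ofList [0] ↔ _
      rw [PySem.Set.mem_ofList]
      simp only [List.mem_singleton]
      constructor
      · rintro rfl
        exact ⟨0, le_refl _, le_refl _, by
          simp only [show (pvG nums 0).1 = 0 from rfl, pvP_zero, PySem.Int.bxor_self]⟩
      · rintro ⟨k, hk1, hk2, rfl⟩
        have h0 : k = 0 := by omega
        subst h0
        simp only [show (pvG nums 0).1 = 0 from rfl, pvP_zero, PySem.Int.bxor_self]
  | succ i ih =>
    have hilen : i < nums.length := by omega
    obtain ⟨ih1, ih2, ih3⟩ := ih (by omega)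
    rw [pvB_succ nums i hilen]
    have hcur : PySem.Int.bxor (pvB nums i).2.1 nums[i] =
        PySem.Int.bxor (pvP nums (pvG nums i).1) (pvP nums (i + 1)) := by
      rw [ih2, pvBxor_assoc, ← pvP_succ nums i hilen]
    have hmem : (PySem.Int.bxor (pvB nums i).2.1 nums[i]) ∈ (pvB nums i).2.2 ↔
        pvCutAt nums (pvG nums i).1 i = true := by
      rw [ih3, pvCutAt_iff]
      constructor
      · rintro ⟨k, hk1, hk2, hk3⟩
        refine ⟨k, hk1, hk2, ?_⟩
        rw [hcur] at hk3
        exact ((pvBxor_left_inj _ _ _).mp hk3).symm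
      · rintro ⟨k, hk1, hk2, hk3⟩
        exact ⟨k, hk1, hk2, by rw [hcur, hk3]⟩
    by_cases hc : pvCutAt nums (pvG nums i).1 i = true
    · have hcont : PySem.Set.contains (pvB nums i).2.2 (PySem.Int.bxor (pvB nums i).2.1 nums[i]) = true :=
        (PySem.Set.contains_iff _ _).mpr (hmem.mpr hc)
      simp only [findXorCount_altStep, hcont, if_true]
      have hg : pvG nums (i + 1) = (i + 1, (pvG nums i).2 + 1) := by rw [pvG_succ]; simp [hc]
      rw [hg]
      refine ⟨by rw [ih1], ?_, ?_⟩
      · show (0 : Int) = PySem.Int.bxor (pvP nums (i + 1)) (pvP nums (i + 1))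
        rw [PySem.Int.bxor_self]
      · intro v
        show v ∈ PySem.Set.ofList [0] ↔ _
        rw [PySem.Set.mem_ofList]
        simp only [List.mem_singleton]
        constructor
        · rintro rfl
          exact ⟨i + 1, le_refl _, le_refl _, by rw [PySem.Int.bxor_self]⟩
        · rintro ⟨k, hk1, hk2, rfl⟩
          have h0 : k = i + 1 := by omega
          subst h0
          rw [PySem.Int.bxor_self]
    · have hcont : PySem.Set.contains (pvB nums i).2.2 (PySem.Int.bxor (pvB nums i).2.1 nums[i]) = false := by
        rw [Bool.eq_false_iff]
        intro hx
        exact hc (hmem.mp ((PySem.Set.contains_iff _ _).mp hx))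
      simp only [findXorCount_altStep, hcont, Bool.false_eq_true, if_false]
      have hg : pvG nums (i + 1) = pvG nums i := by rw [pvG_succ]; simp [hc]
      rw [hg]
      refine ⟨ih1, hcur, ?_⟩
      intro v
      rw [PySem.Set.mem_add, ih3]
      constructor
      · rintro (⟨k, hk1, hk2, rfl⟩ | rfl)
        · exact ⟨k, hk1, by omega, rfl⟩
        · exact ⟨i + 1, by
            have := pvG_fst_le nums i
            omega, le_refl _, hcur⟩
      · rintro ⟨k, hk1, hk2, rfl⟩
        rcases Nat.lt_or_ge k (i + 1) with hlt | hge
        · exact Or.inl ⟨k, hk1, by omega, rfl⟩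
        · have h0 : k = i + 1 := by omega
          subst h0
          exact Or.inr hcur.symm

-- ===== VERDICT (by name: the statement is the Claim_ definition above) =====
theorem findXorCount_spec : Claim_equal_findXorCount := by
  intro nums _ hpre
  unfold Spec_findXorCount
  have hn : 0 < nums.length := List.length_pos_iff.mpr hpre
  obtain ⟨_, hlen, hdp, _⟩ := pvA_inv nums nums.length (le_refl _)
  have hne : (pvA nums nums.length).2.2 ≠ [] := by
    intro h0
    rw [h0] at hlen
    simp at hlen
    omega
  rw [findXorCount_eq_pvA, findXorCount_alt_eq_pvB,
      PySem.List.pyGetD_neg_one _ _ hne, (pvB_inv nums nums.length (le_refl _)).1]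
  have hj := hdp (nums.length - 1) (by omega)
  rw [List.getLast_eq_getElem]
  rw [List.getD_eq_getElem?_getD, List.getElem?_eq_getElem (by omega)] at hj
  simp only [hlen] at *
  rw [if_pos (by omega : nums.length - 1 < nums.length)] at hj
  simp only [Option.getD_some] at hj
  rw [hj]
  show (pvG nums (nums.length - 1 + 1)).2 = (pvG nums nums.length).2
  congr 2
  omega
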